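-- pv_equiv track=rewrite | github.com/AdamZhouSE/pythonHomework | Code/CodeRecords/2514/60657/251036.py | find
-- ===== SOURCE A (Python) =====
-- def find(A,B):
--     cons=[]
--     for i in A:
--         if B.count(i)==0:
--             return False
--         cons.append(B.index(i))
--     new=cons.copy()
--     new.sort()
--     if new==cons:
--         return True
-- ===== SOURCE B (Python) =====
-- def find(A, B):
--     # Precompute first index of each value in B, then one pass over A
--     # keeping the previous index and a running "nondecreasing" flag.
--     first = {}
--     j = 0
--     for x in B:
--         if x not in first:
--             first[x] = j
--         j += 1
--     prev = -1
--     ok = True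
--     for x in A:
--         i = first.get(x)
--         if i is None:
--             return False
--         if i < prev:
--             ok = False
--         prev = i
--     if ok:
--         return True
-- ===== Notes on version B (the rewrite author's own statement) =====
-- stated objective: faster
-- what changed: Replaces the per-element B.count/B.index scans and the final sort-and-compare with a single precomputed value-to-first-index dict and a one-pass running nondecreasing check.
import Mathlib
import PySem

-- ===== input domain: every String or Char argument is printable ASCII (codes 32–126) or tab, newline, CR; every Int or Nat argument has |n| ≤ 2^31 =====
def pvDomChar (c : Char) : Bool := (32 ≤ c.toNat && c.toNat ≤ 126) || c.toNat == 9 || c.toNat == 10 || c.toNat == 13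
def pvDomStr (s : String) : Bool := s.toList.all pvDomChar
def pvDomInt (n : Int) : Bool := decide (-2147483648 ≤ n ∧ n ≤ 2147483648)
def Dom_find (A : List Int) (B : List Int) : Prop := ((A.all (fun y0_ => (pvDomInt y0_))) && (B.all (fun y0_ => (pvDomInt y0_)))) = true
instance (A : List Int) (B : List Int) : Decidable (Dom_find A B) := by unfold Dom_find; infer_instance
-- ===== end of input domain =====

-- B replaces A's per-element B.count/B.index scans and the final sort-and-compare
-- with a precomputed value→first-index dict and a one-pass running nondecreasing check (objective: faster).


-- ===== PORT A =====
-- the 'for i in A' loop: early 'return False', else append B.index(i) to cons;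
-- after the loop, 'return True' iff sorted(cons) == cons, otherwise fall through (None)
def findLoop (rest : List Int) (B : List Int) (cons : List Int) : Option Bool :=
  match rest with
  | [] => if PySem.List.sorted cons (fun x => x) false = cons then some true else none
  | i :: rest' =>
      if PySem.List.count B i = 0 then some false
      else findLoop rest' B (cons ++ [(((PySem.List.index? B i).getD 0 : Nat) : Int)])

def find (A : List Int) (B : List Int) : Option Bool := findLoop A B []

-- ===== PORT B =====
-- 'for x in B: if x not in first: first[x] = j; j += 1'
def buildFirst (rest : List Int) (j : Int) (d : PySem.Dict Int Int) : PySem.Dict Int Int :=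
  match rest with
  | [] => d
  | x :: rest' => buildFirst rest' (j + 1) (if d.contains x then d else d.insert x j)

-- 'for x in A: i = first.get(x); if i is None: return False; if i < prev: ok = False; prev = i'
def findAltLoop (rest : List Int) (first : PySem.Dict Int Int) (prev : Int) (ok : Bool) : Option Bool :=
  match rest with
  | [] => if ok then some true else none
  | x :: rest' =>
      match first.get? x with
      | none => some false
      | some i => findAltLoop rest' first i (if i < prev then false else ok)

def find_alt (A : List Int) (B : List Int) : Option Bool :=
  findAltLoop A (buildFirst B 0 PySem.Dict.empty) (-1) true

-- ===== PRECONDITION & SPEC =====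
def Spec_find (A : List Int) (B : List Int) (out : Option Bool) : Prop := out = find_alt A B
instance (A : List Int) (B : List Int) (out : Option Bool) : Decidable (Spec_find A B out) := by unfold Spec_find; infer_instance

-- ===== CLAIM (what is proved, stated in full; the proofs are below) =====
def Claim_equal_find : Prop := ∀ (A : List Int) (B : List Int), Dom_find A B → Spec_find A B (find A B)

-- ===== LEMMAS AND PROOFS =====

-- the dict built by B's first loop looks up the first index in B
theorem buildFirst_get? (rest : List Int) (j : Int) (d : PySem.Dict Int Int) (v : Int) :
    (buildFirst rest j d).get? v =
      ((d.get? v).orElse (fun _ => (PySem.List.index? rest v).map (fun k => j + (k : Int)))) := by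
  induction rest generalizing j d with
  | nil => simp only [buildFirst, PySem.List.index?_eq_idxOf?, List.idxOf?_nil]
           cases d.get? v <;> rfl
  | cons x rest' ih =>
    by_cases hc : d.contains x = true
    · simp only [buildFirst, hc, if_pos, ih]
      cases hv : d.get? v with
      | some w => rfl
      | none =>
        by_cases hxv : x = v
        · exfalso
          have := PySem.Dict.contains_eq_isSome_get? d x
          rw [hxv, hv] at this
          simp [hxv ▸ hc] at this
        · rw [PySem.List.index?_cons_of_ne rest' hxv]
          cases PySem.List.index? rest' v with
          | none => rfl
          | some k =>
            show some (j + 1 + (k : Int)) = some (j + ((k : Int) + 1))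
            congr 1; ring
    · simp only [buildFirst, if_neg hc, ih]
      by_cases hxv : x = v
      · subst hxv
        have hn : d.get? x = none := by
          have := PySem.Dict.contains_eq_isSome_get? d x
          rw [Bool.not_eq_true] at hc
          rw [hc] at this
          exact Option.not_isSome_iff_eq_none.mp (by simp [← this])
        rw [PySem.Dict.get?_insert_self, hn, PySem.List.index?_cons_self]
        show some j = some (j + ((0 : Nat) : Int))
        simp
      · rw [PySem.Dict.get?_insert_of_ne d j (Ne.symm hxv), PySem.List.index?_cons_of_ne rest' hxv]
        cases hv : d.get? v with
        | some w => rfl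
        | none =>
          cases PySem.List.index? rest' v with
          | none => rfl
          | some k =>
            show some (j + 1 + (k : Int)) = some (j + ((k : Int) + 1))
            congr 1; ring


-- main loop invariant: A's accumulated cons list vs B's (prev, ok) state
theorem loop_eq (rest B : List Int) (cons : List Int) (prev : Int) (ok : Bool)
    (hok : ok = true ↔ cons.Pairwise (· ≤ ·))
    (hub : ok = true → ∀ y ∈ cons, y ≤ prev)
    (hprev : prev ∈ cons ∨ (cons = [] ∧ prev = -1)) :
    findLoop rest B cons = findAltLoop rest (buildFirst B 0 PySem.Dict.empty) prev ok := by
  induction rest generalizing cons prev ok with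
  | nil =>
    simp only [findLoop, findAltLoop]
    by_cases h : ok = true
    · rw [if_pos (PySem.List.sorted_eq_self_of_pairwise cons (fun x => x) (hok.mp h)), if_pos h]
    · rw [if_neg h, if_neg ?_]
      intro hs
      exact h (hok.mpr (by rw [← hs]; exact PySem.List.sorted_pairwise cons (fun x => x)))
  | cons x rest' ih =>
    simp only [findLoop, findAltLoop]
    have hget : (buildFirst B 0 PySem.Dict.empty).get? x
        = (PySem.List.index? B x).map (fun k => (k : Int)) := by
      rw [buildFirst_get?]
      have he : (PySem.Dict.empty : PySem.Dict Int Int).get? x = none := rfl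
      rw [he]
      cases PySem.List.index? B x with
      | none => rfl
      | some k =>
        show some ((0 : Int) + (k : Int)) = some ((k : Int))
        simp
    by_cases hcnt : PySem.List.count B x = 0
    · have hnot : x ∉ B := by
        rw [PySem.List.count_eq] at hcnt
        exact List.count_eq_zero.mp hcnt
      have hidx : PySem.List.index? B x = none := (PySem.List.index?_eq_none_iff B x).mpr hnot
      rw [if_pos hcnt, hget, hidx]
      rfl
    · obtain ⟨k, hk⟩ : ∃ k, PySem.List.index? B x = some k := by
        rcases h : PySem.List.index? B x with _ | k
        · exact absurd ((PySem.List.index?_eq_none_iff B x).mp h)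
            (fun hnb => hcnt (by rw [PySem.List.count_eq]; exact List.count_eq_zero.mpr hnb))
        · exact ⟨k, rfl⟩
      have hget2 : (buildFirst B 0 PySem.Dict.empty).get? x = some ((k : Int)) := by
        rw [hget, hk]; rfl
      rw [if_neg hcnt, hget2, hk, Option.getD_some]
      show findLoop rest' B (cons ++ [((k : Nat) : Int)])
          = findAltLoop rest' (buildFirst B 0 PySem.Dict.empty) (k : Int)
              (if (k : Int) < prev then false else ok)
      apply ih
      · -- new ok flag iff the extended cons list is nondecreasing
        by_cases hlt : (k : Int) < prev
        · have hne : cons ≠ [] := by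
            rintro rfl
            rcases hprev with h | ⟨_, hp⟩
            · exact absurd h (List.not_mem_nil)
            · omega
          have hmem : prev ∈ cons := hprev.resolve_right (fun h => hne h.1)
          rw [if_pos hlt]
          constructor
          · intro h; exact absurd h (by simp)
          · intro hp
            rw [List.pairwise_append] at hp
            have := hp.2.2 prev hmem (k : Int) (List.mem_singleton.mpr rfl)
            omega
        · rw [if_neg hlt, hok, List.pairwise_append]
          constructor
          · intro hp
            refine ⟨hp, List.pairwise_singleton _ _, ?_⟩
            intro a ha b hb
            rw [List.mem_singleton] at hb; subst hb
            have := hub (hok.mpr hp) a ha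
            omega
          · exact fun h => h.1
      · -- new prev bounds the extended cons list when the flag is still true
        intro hok' y hy
        by_cases hlt : (k : Int) < prev
        · rw [if_pos hlt] at hok'; exact absurd hok' (by simp)
        · rw [if_neg hlt] at hok'
          rcases List.mem_append.mp hy with h | h
          · have := hub hok' y h; omega
          · rw [List.mem_singleton] at h; omega
      · exact Or.inl (List.mem_append.mpr (Or.inr (List.mem_singleton.mpr rfl)))

-- ===== VERDICT (by name: the statement is the Claim_ definition above) =====
theorem find_spec : Claim_equal_find := by
  intro A B _
  unfold Spec_find find find_alt
  exact loop_eq A B [] (-1) true (by simp) (by simp) (Or.inr ⟨rfl, rfl⟩)
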